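-- pv_equiv track=rewrite | github.com/JuliusBoateng/advent_of_code_2020 | day9/day9_a.py | invalidXmas
-- ===== SOURCE A (Python) =====
-- def validNums(xmas, start, stop):
--     valid_set = set()
--
--     for x in range(start, stop - 1):
--         for y in range(x + 1, stop):
--             val = xmas[x] + xmas[y]
--             valid_set.add(val)
--
--     return valid_set
--
-- def invalidXmas(xmas, preamble):
--     index = preamble
--
--     while index < len(xmas):
--         valid_set = validNums(xmas, index - preamble, index)
--
--         if xmas[index] not in valid_set:
--             return xmas[index]
--
--         index += 1
--
--     return None
-- ===== SOURCE B (Python) =====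
-- def invalidXmas(xmas, preamble):
--     # For each position, single two-sum scan of the window with a 'seen' set
--     # instead of materialising all pairwise sums: O(n*p) instead of O(n*p^2).
--     for i in range(preamble, len(xmas)):
--         target = xmas[i]
--         window = xmas[i - preamble:i]
--         seen = set()
--         found = False
--         for v in window:
--             if target - v in seen:
--                 found = True
--                 break
--             seen.add(v)
--         if not found:
--             return target
--     return None
-- ===== Notes on version B (the rewrite author's own statement) =====
-- stated objective: faster
-- what changed: Instead of materialising the set of all pairwise sums of the window for every index (nested loops over index pairs), B does a single two-sum scan of the window with a running 'seen' set of values, checking target-v membership.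
-- outside the precondition, e.g. on invalidXmas([1, 2, 3], -1): A returns 3, B returns 1
import Mathlib
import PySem

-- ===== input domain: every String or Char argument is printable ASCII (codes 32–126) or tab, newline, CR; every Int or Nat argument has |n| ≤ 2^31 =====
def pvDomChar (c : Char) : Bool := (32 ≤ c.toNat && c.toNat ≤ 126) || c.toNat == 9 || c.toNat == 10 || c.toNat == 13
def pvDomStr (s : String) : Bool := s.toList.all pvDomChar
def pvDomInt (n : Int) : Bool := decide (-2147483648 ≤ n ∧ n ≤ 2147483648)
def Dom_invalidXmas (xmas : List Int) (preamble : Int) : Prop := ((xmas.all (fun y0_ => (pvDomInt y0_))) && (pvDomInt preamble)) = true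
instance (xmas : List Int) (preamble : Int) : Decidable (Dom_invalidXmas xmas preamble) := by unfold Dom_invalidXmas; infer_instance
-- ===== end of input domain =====

-- B replaces the per-index set of all pairwise window sums by a single two-sum scan of the window ("faster" objective).

-- ===== PORT A =====
-- validNums(xmas, start, stop): set of xmas[x]+xmas[y] for start <= x < y < stop.
-- xmas[x] is exact (pyGetD default never read) whenever the indices are in range, which holds on Pre_.
def validNums (xmas : List Int) (start stop : Int) : PySem.Set Int :=
  (PySem.List.pyRange start (stop - 1)).foldl (fun s x =>
    (PySem.List.pyRange (x + 1) stop).foldl (fun s y =>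
      PySem.Set.add s (PySem.List.pyGetD xmas x 0 + PySem.List.pyGetD xmas y 0)) s)
    PySem.Set.empty

-- the 'while index < len(xmas)' loop of A
def invalidXmasGo (xmas : List Int) (preamble : Int) (index : Int) : Option Int :=
  if h : index < (xmas.length : Int) then
    let vs := validNums xmas (index - preamble) index
    let v := PySem.List.pyGetD xmas index 0
    if PySem.Set.contains vs v then invalidXmasGo xmas preamble (index + 1)
    else some v
  else none
termination_by ((xmas.length : Int) - index).toNat
decreasing_by omega

def invalidXmas (xmas : List Int) (preamble : Int) : Option Int :=
  invalidXmasGo xmas preamble preamble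

-- ===== PORT B =====
-- the inner 'for v in window: …' two-sum scan of Source B (early break = returning true)
def scanPair (target : Int) : List Int → PySem.Set Int → Bool
  | [], _ => false
  | v :: rest, seen =>
    if PySem.Set.contains seen (target - v) then true
    else scanPair target rest (PySem.Set.add seen v)

-- the 'for i in range(preamble, len(xmas)): …' loop of Source B (early return via recursion)
def altGo (xmas : List Int) (preamble : Int) : List Int → Option Int
  | [] => none
  | i :: rest =>
    let target := PySem.List.pyGetD xmas i 0
    let window := PySem.List.slice xmas (some (i - preamble)) (some i)
    if scanPair target window PySem.Set.empty then altGo xmas preamble rest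
    else some target

def invalidXmas_alt (xmas : List Int) (preamble : Int) : Option Int :=
  altGo xmas preamble (PySem.List.pyRange preamble (xmas.length : Int))

-- ===== PRECONDITION & SPEC =====
-- Pre_ excludes negative preamble: there A indexes xmas[preamble] through Python's
-- negative-index wraparound (an accident of the implementation; IndexError when preamble < -len(xmas)),
-- and B's window slicing gives a different, natural reading of such inputs.
def Pre_invalidXmas (xmas : List Int) (preamble : Int) : Prop := 0 ≤ preamble
instance (xmas : List Int) (preamble : Int) : Decidable (Pre_invalidXmas xmas preamble) := by unfold Pre_invalidXmas; infer_instance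

def pvWitness_invalidXmas : List Int × Int := ([35, 20, 15, 25, 47, 40, 62, 55, 65, 95, 102, 117, 150, 182, 127], 5)

def Spec_invalidXmas (xmas : List Int) (preamble : Int) (out : Option Int) : Prop := out = invalidXmas_alt xmas preamble
instance (xmas : List Int) (preamble : Int) (out : Option Int) : Decidable (Spec_invalidXmas xmas preamble out) := by unfold Spec_invalidXmas; infer_instance

-- ===== CLAIM (what is proved, stated in full; the proofs are below) =====
def Claim_equal_invalidXmas : Prop := ∀ (xmas : List Int) (preamble : Int), Dom_invalidXmas xmas preamble → Pre_invalidXmas xmas preamble → Spec_invalidXmas xmas preamble (invalidXmas xmas preamble)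

-- ===== LEMMAS AND PROOFS =====

-- membership in a foldl that adds one value per element
theorem mem_foldl_set_add {α : Type} (l : List α) (f : α → Int) (s : PySem.Set Int) (t : Int) :
    t ∈ l.foldl (fun s x => PySem.Set.add s (f x)) s ↔ t ∈ s ∨ ∃ x ∈ l, f x = t := by
  induction l generalizing s with
  | nil => simp
  | cons a l ih =>
    simp only [List.foldl_cons, ih, PySem.Set.mem_add, List.mem_cons]
    constructor
    · rintro (⟨h | h⟩ | ⟨x, hx, hfx⟩)
      · exact Or.inl h
      · exact Or.inr ⟨a, Or.inl rfl, h.symm⟩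
      · exact Or.inr ⟨x, Or.inr hx, hfx⟩
    · rintro (h | ⟨x, (rfl | hx), hfx⟩)
      · exact Or.inl (Or.inl h)
      · exact Or.inl (Or.inr hfx.symm)
      · exact Or.inr ⟨x, hx, hfx⟩

-- membership in a foldl whose body adds a batch per element
theorem mem_foldl_set_batch {α : Type} (l : List α) (g : PySem.Set Int → α → PySem.Set Int)
    (P : α → Int → Prop) (hg : ∀ s x t, t ∈ g s x ↔ t ∈ s ∨ P x t) (s : PySem.Set Int) (t : Int) :
    t ∈ l.foldl g s ↔ t ∈ s ∨ ∃ x ∈ l, P x t := by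
  induction l generalizing s with
  | nil => simp
  | cons a l ih =>
    simp only [List.foldl_cons, ih, hg, List.mem_cons]
    constructor
    · rintro (⟨h | h⟩ | ⟨x, hx, hP⟩)
      · exact Or.inl h
      · exact Or.inr ⟨a, Or.inl rfl, h⟩
      · exact Or.inr ⟨x, Or.inr hx, hP⟩
    · rintro (h | ⟨x, (rfl | hx), hP⟩)
      · exact Or.inl (Or.inl h)
      · exact Or.inl (Or.inr hP)
      · exact Or.inr ⟨x, hx, hP⟩

-- characterisation of A's valid_set
theorem mem_validNums (xmas : List Int) (start stop t : Int) :
    t ∈ validNums xmas start stop ↔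
      ∃ x y : Int, start ≤ x ∧ x < y ∧ y < stop ∧
        PySem.List.pyGetD xmas x 0 + PySem.List.pyGetD xmas y 0 = t := by
  unfold validNums
  rw [mem_foldl_set_batch _ _
    (fun x t => ∃ y ∈ PySem.List.pyRange (x + 1) stop,
      PySem.List.pyGetD xmas x 0 + PySem.List.pyGetD xmas y 0 = t)
    (fun s x t => mem_foldl_set_add _ _ s t)]
  simp only [PySem.Set.empty, List.not_mem_nil, false_or, PySem.List.mem_pyRange_one]
  constructor
  · rintro ⟨x, ⟨hx1, hx2⟩, y, ⟨hy1, hy2⟩, ht⟩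
    exact ⟨x, y, hx1, by omega, hy2, ht⟩
  · rintro ⟨x, y, hx1, hxy, hy, ht⟩
    exact ⟨x, ⟨hx1, by omega⟩, y, ⟨by omega, hy⟩, ht⟩

-- characterisation of B's two-sum scan
theorem scanPair_true_iff (t : Int) (w : List Int) (seen : PySem.Set Int) :
    scanPair t w seen = true ↔
      ∃ (j : Nat) (hj : j < w.length),
        (t - w[j]) ∈ seen ∨ ∃ (k : Nat) (hk : k < j), w[k]'(by omega) + w[j] = t := by
  induction w generalizing seen with
  | nil => simp [scanPair]
  | cons v rest ih =>
    rw [scanPair, PySem.Set.contains_eq_decide]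
    by_cases hc : (t - v) ∈ seen
    · rw [if_pos (by simpa using hc)]
      constructor
      · intro _
        exact ⟨0, by simp, Or.inl (by simpa using hc)⟩
      · intro _
        rfl
    · rw [if_neg (by simpa using hc), ih]
      constructor
      · rintro ⟨j, hj, h | ⟨k, hk, hsum⟩⟩
        · rw [PySem.Set.mem_add] at h
          rcases h with h | h
          · exact ⟨j + 1, by simpa using hj, Or.inl (by simpa using h)⟩
          · refine ⟨j + 1, by simpa using hj, Or.inr ⟨0, by omega, ?_⟩⟩
            simp only [List.getElem_cons_zero, List.getElem_cons_succ]
            omega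
        · exact ⟨j + 1, by simpa using hj, Or.inr ⟨k + 1, by omega, by simpa using hsum⟩⟩
      · rintro ⟨j, hj, h | ⟨k, hk, hsum⟩⟩
        · match j, hj, h with
          | 0, hj, h => exact absurd (by simpa using h) hc
          | j + 1, hj, h =>
            exact ⟨j, by simpa using hj, Or.inl (by rw [PySem.Set.mem_add]; left; simpa using h)⟩
        · match j, hj, k, hk, hsum with
          | 0, hj, k, hk, hsum => omega
          | j + 1, hj, 0, hk, hsum =>
            refine ⟨j, by simpa using hj, Or.inl ?_⟩
            rw [PySem.Set.mem_add]
            right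
            simp only [List.getElem_cons_zero, List.getElem_cons_succ] at hsum
            omega
          | j + 1, hj, k + 1, hk, hsum =>
            exact ⟨j, by simpa using hj, Or.inr ⟨k, by omega, by simpa using hsum⟩⟩

-- the per-index check of A equals the per-index check of B
theorem check_eq (xmas : List Int) (preamble index : Int)
    (hp : 0 ≤ preamble) (hpi : preamble ≤ index) (hlen : index < (xmas.length : Int)) :
    PySem.Set.contains (validNums xmas (index - preamble) index) (PySem.List.pyGetD xmas index 0)
      = scanPair (PySem.List.pyGetD xmas index 0)
          (PySem.List.slice xmas (some (index - preamble)) (some index)) PySem.Set.empty := by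
  set t := PySem.List.pyGetD xmas index 0 with ht
  have hs0 : (0 : Int) ≤ index - preamble := by omega
  have hi0 : (0 : Int) ≤ index := by omega
  rw [PySem.Set.contains_eq_decide]
  rw [PySem.List.slice_toNat xmas hs0 hi0]
  set a := (index - preamble).toNat with ha
  set b := index.toNat with hb
  have hab : a ≤ b := by omega
  have hblen : b ≤ xmas.length := by omega
  set w := List.take (b - a) (List.drop a xmas) with hw
  have hwlen : w.length = b - a := by
    simp [hw, List.length_take, List.length_drop]; omega
  have hwget : ∀ (k : Nat) (hk : k < w.length), w[k] = xmas[a + k]'(by omega) := by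
    intro k hk
    simp [hw, List.getElem_take, List.getElem_drop]
  rcases Bool.eq_false_or_eq_true (scanPair t w PySem.Set.empty) with htrue | hfalse
  · rw [htrue, decide_eq_true_eq]
    rw [scanPair_true_iff] at htrue
    rcases htrue with ⟨j, hj, hmem | ⟨k, hk, hsum⟩⟩
    · exact absurd hmem (by simp [PySem.Set.empty])
    · rw [mem_validNums]
      refine ⟨(a + k : Nat), (a + j : Nat), by omega, by omega, by omega, ?_⟩
      rw [hwget, hwget] at hsum
      rw [PySem.List.pyGetD_eq_getElem xmas 0 (by omega) (by push_cast; omega),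
          PySem.List.pyGetD_eq_getElem xmas 0 (by omega) (by push_cast; omega)]
      simpa using hsum
  · rw [hfalse, decide_eq_false_iff_not]
    rw [mem_validNums]
    rintro ⟨x, y, hx1, hxy, hy, hsum⟩
    have hxf : scanPair t w PySem.Set.empty = true := by
      rw [scanPair_true_iff]
      have hx0 : 0 ≤ x := by omega
      have hy0 : 0 ≤ y := by omega
      refine ⟨(y - index + preamble).toNat, by omega, Or.inr ⟨(x - index + preamble).toNat, by omega, ?_⟩⟩
      rw [hwget, hwget]
      rw [PySem.List.pyGetD_eq_getElem xmas 0 hx0 (by omega),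
          PySem.List.pyGetD_eq_getElem xmas 0 hy0 (by omega)] at hsum
      have e1 : a + (x - index + preamble).toNat = x.toNat := by omega
      have e2 : a + (y - index + preamble).toNat = y.toNat := by omega
      simp only [e1, e2]
      exact hsum
    rw [hfalse] at hxf; exact absurd hxf (by simp)

-- the loops agree
theorem go_eq_altGo (xmas : List Int) (preamble : Int) (hp : 0 ≤ preamble) :
    ∀ (n : Nat) (index : Int), preamble ≤ index → ((xmas.length : Int) - index).toNat = n →
      invalidXmasGo xmas preamble index = altGo xmas preamble (PySem.List.pyRange index (xmas.length : Int)) := by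
  intro n
  induction n using Nat.strong_induction_on with
  | _ n ih =>
    intro index hpi hn
    rw [invalidXmasGo]
    by_cases h : index < (xmas.length : Int)
    · rw [dif_pos h, PySem.List.pyRange_one_cons h]
      simp only [altGo]
      rw [check_eq xmas preamble index hp hpi h]
      by_cases hfound :
          scanPair (PySem.List.pyGetD xmas index 0)
            (PySem.List.slice xmas (some (index - preamble)) (some index)) PySem.Set.empty = true
      · rw [hfound, if_pos rfl]
        exact ih (((xmas.length : Int) - (index + 1)).toNat) (by omega) (index + 1) (by omega) rfl
      · rw [Bool.not_eq_true] at hfound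
        rw [hfound]
        simp
    · rw [dif_neg h, PySem.List.pyRange_one_eq_nil (by omega)]
      simp [altGo]

-- ===== VERDICT (by name: the statement is the Claim_ definition above) =====
theorem invalidXmas_spec : Claim_equal_invalidXmas := by
  intro xmas preamble _ hpre
  unfold Spec_invalidXmas invalidXmas invalidXmas_alt
  exact go_eq_altGo xmas preamble hpre _ preamble le_rfl rfl
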